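-- pv_equiv track=rewrite | github.com/RicHPed/Trush-Program | room_permutation.py | find_least_square
-- ===== SOURCE A (Python) =====
-- def find_least_square(list, permutations):
--     d2 = {}
--     for i in permutations:
--         score = 0
--         for j in range(len(i)):
--             score += list[j].index(i[j]) ** 2
--         d2.setdefault(score, [])
--         d2[score].append(i)
--     if d2.keys():
--         return d2[min(d2.keys())]
--     return []
-- ===== SOURCE B (Python) =====
-- def find_least_square(list, permutations):
--     best = None
--     result = []
--     for p in permutations:
--         score = sum(list[j].index(p[j]) ** 2 for j in range(len(p)))
--         if best is None or score < best:
--             best = score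
--             result = [p]
--         elif score == best:
--             result.append(p)
--     return result
-- ===== Notes on version B (the rewrite author's own statement) =====
-- stated objective: simpler
-- what changed: Replaces the score-to-permutations dict plus trailing min-over-keys pass by a single running-minimum pass that keeps only the current best score and its list of permutations.
import Mathlib
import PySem

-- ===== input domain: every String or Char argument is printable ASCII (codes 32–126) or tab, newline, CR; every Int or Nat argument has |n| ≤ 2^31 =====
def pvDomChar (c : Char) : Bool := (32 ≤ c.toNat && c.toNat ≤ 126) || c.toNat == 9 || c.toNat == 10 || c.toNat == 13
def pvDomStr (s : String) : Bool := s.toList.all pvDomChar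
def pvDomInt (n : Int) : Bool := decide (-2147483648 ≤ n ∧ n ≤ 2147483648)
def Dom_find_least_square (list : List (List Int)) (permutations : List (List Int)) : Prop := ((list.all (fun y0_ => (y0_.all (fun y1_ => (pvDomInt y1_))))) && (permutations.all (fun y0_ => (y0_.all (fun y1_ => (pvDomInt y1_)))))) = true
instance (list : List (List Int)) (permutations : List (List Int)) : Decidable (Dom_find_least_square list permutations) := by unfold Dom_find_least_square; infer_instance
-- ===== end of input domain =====

-- B replaces A's score→permutations dict plus the trailing min-over-keys pass by a single
-- running-minimum pass (best score so far + its permutations); objective: simpler.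

-- ===== PORT A =====
-- the score expression shared verbatim by both Pythons:
-- sum over j in range(len(p)) of list[j].index(p[j]) ** 2
def pvScore (list : List (List Int)) (p : List Int) : Int :=
  (PySem.List.pyRange 0 (p.length : Int) 1).foldl (fun score j =>
    score + (((PySem.List.index? ((PySem.List.pyGet? list j).getD [])
        ((PySem.List.pyGet? p j).getD 0)).getD 0 : Nat) : Int) ^ 2) 0

def find_least_square (list : List (List Int)) (permutations : List (List Int)) : List (List Int) :=
  let d2 := permutations.foldl (fun d2 i =>
    let score := pvScore list i
    let d2 := PySem.Dict.setdefault d2 score []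
    PySem.Dict.insert d2 score (PySem.Dict.getD d2 score [] ++ [i]))
    (PySem.Dict.empty : PySem.Dict Int (List (List Int)))
  if d2.keys ≠ [] then
    match PySem.List.min? d2.keys (fun k => k) with
    | some m => PySem.Dict.getD d2 m []
    | none => []
  else []

-- ===== PORT B =====
def find_least_square_alt (list : List (List Int)) (permutations : List (List Int)) : List (List Int) :=
  (permutations.foldl (fun st p =>
      let score := pvScore list p
      match st with
      | (none, _) => (some score, [p])
      | (some best, result) =>
        if score < best then (some score, [p])
        else if score = best then (some best, result ++ [p])
        else (some best, result))
    ((none : Option Int), ([] : List (List Int)))).2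

-- ===== PRECONDITION & SPEC =====
-- Pre_ excludes exactly the inputs on which A raises: a permutation longer than `list`
-- (IndexError on list[j]) or containing at position j a value absent from list[j] (ValueError).
def Pre_find_least_square (list : List (List Int)) (permutations : List (List Int)) : Prop :=
  ∀ p ∈ permutations, p.length ≤ list.length ∧ ∀ q ∈ p.zip list, q.1 ∈ q.2
instance (list : List (List Int)) (permutations : List (List Int)) : Decidable (Pre_find_least_square list permutations) := by unfold Pre_find_least_square; infer_instance
def pvWitness_find_least_square : List (List Int) × List (List Int) :=
  ([[0, 1], [0, 1]], [[0, 1], [1, 0]])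

def Spec_find_least_square (list : List (List Int)) (permutations : List (List Int)) (out : List (List Int)) : Prop := out = find_least_square_alt list permutations
instance (list : List (List Int)) (permutations : List (List Int)) (out : List (List Int)) : Decidable (Spec_find_least_square list permutations out) := by unfold Spec_find_least_square; infer_instance

-- ===== CLAIM (what is proved, stated in full; the proofs are below) =====
def Claim_equal_find_least_square : Prop := ∀ (list : List (List Int)) (permutations : List (List Int)), Dom_find_least_square list permutations → Pre_find_least_square list permutations → Spec_find_least_square list permutations (find_least_square list permutations)

-- ===== LEMMAS AND PROOFS =====

-- A's dict step (setdefault then in-place append) is Dict.modify.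
theorem pvStepA_eq_modify (d : PySem.Dict Int (List (List Int))) (sc : Int) (p : List Int) :
    (PySem.Dict.insert (PySem.Dict.setdefault d sc []) sc
      (PySem.Dict.getD (PySem.Dict.setdefault d sc []) sc [] ++ [p]))
    = PySem.Dict.modify d sc [] (· ++ [p]) := by
  by_cases h : d.contains sc = true
  · rw [PySem.Dict.setdefault_of_contains d [] h]
    simp [PySem.Dict.modify]
  · rw [PySem.Dict.setdefault_of_not_contains d [] (by simpa using h)]
    simp [PySem.Dict.modify, PySem.Dict.getD_insert_self,
      PySem.Dict.getD_of_not_contains _ _ (by simpa using h),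
      PySem.Dict.insert_insert_self]

-- A's dict keyed fold, rewritten as a modify fold over (score, perm) pairs.
theorem pvFoldA_eq (f : List Int → Int) (ps : List (List Int)) :
    ps.foldl (fun d2 i =>
        let score := f i
        let d2 := PySem.Dict.setdefault d2 score []
        PySem.Dict.insert d2 score (PySem.Dict.getD d2 score [] ++ [i]))
      (PySem.Dict.empty : PySem.Dict Int (List (List Int)))
    = (ps.map (fun p => (f p, p))).foldl
        (fun d q => PySem.Dict.modify d q.1 [] (· ++ [q.2])) PySem.Dict.empty := by
  rw [List.foldl_map]
  exact PySem.List.foldl_congr_mem ps _ _ _ (fun d p _ => pvStepA_eq_modify d (f p) p)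

theorem pvFoldA_getD (f : List Int → Int) (ps : List (List Int)) (c : Int) :
    (ps.foldl (fun d2 i =>
        let score := f i
        let d2 := PySem.Dict.setdefault d2 score []
        PySem.Dict.insert d2 score (PySem.Dict.getD d2 score [] ++ [i]))
      (PySem.Dict.empty : PySem.Dict Int (List (List Int)))).getD c []
    = ps.filter (fun p => f p == c) := by
  rw [pvFoldA_eq, PySem.Dict.getD_foldl_modify_append]
  simp [List.filter_map, Function.comp_def]

theorem pvFoldA_keys (f : List Int → Int) (ps : List (List Int)) :
    (ps.foldl (fun d2 i =>
        let score := f i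
        let d2 := PySem.Dict.setdefault d2 score []
        PySem.Dict.insert d2 score (PySem.Dict.getD d2 score [] ++ [i]))
      (PySem.Dict.empty : PySem.Dict Int (List (List Int)))).keys
    = PySem.Set.ofList (ps.map f) := by
  rw [pvFoldA_eq,
    PySem.Dict.keys_foldl_modify_key (ps.map (fun p => (f p, p))) Prod.fst []
      (fun _ q => (· ++ [q.2]))]
  simp [PySem.Set.update, PySem.Set.ofList_eq_foldl, PySem.Dict.keys_empty, List.map_map,
    Function.comp_def]

-- min over the distinct scores equals min over all scores (as a value).
theorem pvMin?_ofList (xs : List Int) :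
    PySem.List.min? (PySem.Set.ofList xs) (fun k => k) = PySem.List.min? xs (fun k => k) := by
  cases hx : PySem.List.min? xs (fun k => k) with
  | none =>
    rw [(PySem.List.min?_eq_none_iff xs _).1 hx]
    rfl
  | some m =>
    have hm : m ∈ xs := PySem.List.min?_mem hx
    cases hy : PySem.List.min? (PySem.Set.ofList xs) (fun k => k) with
    | none =>
      have h0 := (PySem.List.min?_eq_none_iff (PySem.Set.ofList xs) _).1 hy
      exact absurd h0 (by
        intro h
        exact (List.ne_nil_of_mem ((PySem.Set.mem_ofList xs m).2 hm)) h)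
    | some n =>
      have hn : n ∈ xs := (PySem.Set.mem_ofList xs n).1 (PySem.List.min?_mem hy)
      have h1 : m ≤ n := PySem.List.min?_isMin hx n hn
      have h2 : n ≤ m := PySem.List.min?_isMin hy m ((PySem.Set.mem_ofList xs m).2 hm)
      exact congrArg some (le_antisymm h2 h1)

-- B's running-minimum loop, characterized from a some-state.
theorem pvFoldB_inv (f : List Int → Int) (ps : List (List Int)) :
    ∀ (b : Int) (res : List (List Int)),
    ps.foldl (fun st p =>
        let score := f p
        match st with
        | (none, _) => (some score, [p])
        | (some best, result) =>
          if score < best then (some score, [p])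
          else if score = best then (some best, result ++ [p])
          else (some best, result)) (some b, res)
    = (some ((ps.map f).foldl min b),
       (if (ps.map f).foldl min b = b then res else [])
         ++ ps.filter (fun p => f p == (ps.map f).foldl min b)) := by
  induction ps with
  | nil => simp
  | cons p ps ih =>
    intro b res
    have hfold : ((p :: ps).map f).foldl min b = (ps.map f).foldl min (min b (f p)) := by
      simp [List.foldl_cons]
    simp only [List.foldl_cons]
    show ps.foldl _
        (if f p < b then (some (f p), [p])
         else if f p = b then (some b, res ++ [p]) else (some b, res)) = _
    by_cases h1 : f p < b
    · rw [if_pos h1, ih (f p) [p], hfold, min_eq_right h1.le]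
      have hle : (ps.map f).foldl min (f p) ≤ f p := (PySem.List.foldl_min_le (ps.map f) (f p)).1
      refine Prod.ext rfl ?_
      have hnb : ¬ (ps.map f).foldl min (f p) = b := by omega
      rw [if_neg hnb, List.filter_cons]
      by_cases hm : (ps.map f).foldl min (f p) = f p
      · simp [hm]
      · simp [beq_iff_eq, Ne.symm hm, hm]
    · by_cases h2 : f p = b
      · rw [if_neg h1, if_pos h2, ih b (res ++ [p]), hfold, h2, min_self]
        refine Prod.ext rfl ?_
        rw [List.filter_cons]
        by_cases hm : (ps.map f).foldl min b = b
        · simp [hm, h2]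
        · simp [hm, h2]
          omega
      · rw [if_neg h1, if_neg h2, ih b res, hfold, min_eq_left (by omega)]
        refine Prod.ext rfl ?_
        have hle : (ps.map f).foldl min b ≤ b := (PySem.List.foldl_min_le (ps.map f) b).1
        rw [List.filter_cons]
        have : ¬ (f p == (ps.map f).foldl min b) = true := by
          simp [beq_iff_eq]; omega
        simp [this]

-- ===== VERDICT (by name: the statement is the Claim_ definition above) =====
theorem find_least_square_spec : Claim_equal_find_least_square := by
  intro list perms _ _
  unfold Spec_find_least_square
  cases perms with
  | nil => rfl
  | cons p ps =>
    have hkeys := pvFoldA_keys (pvScore list) (p :: ps)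
    have hgetD := pvFoldA_getD (pvScore list) (p :: ps)
    simp only [find_least_square, find_least_square_alt]
    rw [hkeys, pvMin?_ofList]
    have hne : PySem.Set.ofList ((p :: ps).map (pvScore list)) ≠ [] := by
      intro h
      exact List.ne_nil_of_mem
        ((PySem.Set.mem_ofList _ _).2 (List.mem_map_of_mem (List.mem_cons_self ..)
          (f := pvScore list))) h
    rw [if_pos hne, List.map_cons, PySem.List.min?_id_cons]
    refine (hgetD ((ps.map (pvScore list)).foldl min (pvScore list p))).trans ?_
    -- B side
    symm
    rw [List.foldl_cons]
    show ((ps.foldl _ (some (pvScore list p), [p])).2 : List (List Int)) = _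
    rw [pvFoldB_inv (pvScore list) ps (pvScore list p) [p]]
    symm
    rw [List.filter_cons]
    by_cases hm : (ps.map (pvScore list)).foldl min (pvScore list p) = pvScore list p
    · simp [hm]
    · simp [hm, Ne.symm hm]
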